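-- pv_equiv track=rewrite | github.com/AmrYami/co-pilot | apps/dw/sqlbuilder.py | _parse_flag_blob
-- ===== SOURCE A (Python) =====
-- from typing import Any, Dict, List, Optional, Tuple
--
-- def _parse_flag_blob(blob: str) -> Tuple[bool, bool]:
--     ci = True
--     trim = True
--     if not blob:
--         return ci, trim
--     for raw in blob.split(","):
--         token = raw.strip().lower()
--         if not token:
--             continue
--         if token in {"ci", "case_insensitive"}:
--             ci = True
--         elif token in {"no_ci", "case_sensitive", "exact"}:
--             ci = False
--         elif token == "trim":
--             trim = True
--         elif token in {"no_trim", "raw"}: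
--             trim = False
--     return ci, trim
-- ===== SOURCE B (Python) =====
-- _CI_TABLE = {"ci": True, "case_insensitive": True,
--              "no_ci": False, "case_sensitive": False, "exact": False}
-- _TRIM_TABLE = {"trim": True, "no_trim": False, "raw": False}
--
-- def _parse_flag_blob(blob: str):
--     tokens = [raw.strip().lower() for raw in blob.split(",")] if blob else []
--     ci = next((_CI_TABLE[t] for t in reversed(tokens) if t in _CI_TABLE), True)
--     trim = next((_TRIM_TABLE[t] for t in reversed(tokens) if t in _TRIM_TABLE), True)
--     return ci, trim
-- ===== Notes on version B (the rewrite author's own statement) =====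
-- stated objective: idiomatic
-- what changed: Replaces A's single forward loop with mutable last-wins flag state by a declarative dispatch table: tokens are normalized once, then each flag is resolved independently as the first table hit in a backward scan (last-occurrence-wins), defaulting to True.
import Mathlib
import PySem

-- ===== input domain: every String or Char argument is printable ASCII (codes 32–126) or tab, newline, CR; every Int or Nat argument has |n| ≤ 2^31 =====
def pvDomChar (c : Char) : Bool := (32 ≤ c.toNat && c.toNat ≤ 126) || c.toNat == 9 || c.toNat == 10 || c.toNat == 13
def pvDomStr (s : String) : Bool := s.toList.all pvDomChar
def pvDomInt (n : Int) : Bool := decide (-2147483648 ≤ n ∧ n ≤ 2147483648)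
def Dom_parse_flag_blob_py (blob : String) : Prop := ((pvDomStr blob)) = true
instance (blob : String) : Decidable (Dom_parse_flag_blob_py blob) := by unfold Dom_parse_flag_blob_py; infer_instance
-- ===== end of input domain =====

-- B replaces A's forward if/elif fold by a per-flag backward first-match over a dispatch table (idiomatic; same cost).

-- shared helper: token = raw.strip().lower()
def pvNormTok (raw : List Char) : List Char := PySem.Chars.lower (PySem.Chars.strip raw)

-- ===== PORT A =====
def pvLoopA : List (List Char) → Bool → Bool → Bool × Bool
  | [], ci, trim => (ci, trim)
  | raw :: rest, ci, trim =>
    let token := pvNormTok raw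
    if token = [] then pvLoopA rest ci trim
    else if token = "ci".toList ∨ token = "case_insensitive".toList then pvLoopA rest true trim
    else if token = "no_ci".toList ∨ token = "case_sensitive".toList ∨ token = "exact".toList then
      pvLoopA rest false trim
    else if token = "trim".toList then pvLoopA rest ci true
    else if token = "no_trim".toList ∨ token = "raw".toList then pvLoopA rest ci false
    else pvLoopA rest ci trim

def parse_flag_blob_py (blob : String) : Bool × Bool :=
  if blob.toList = [] then (true, true)
  else pvLoopA (PySem.Chars.splitOn blob.toList [',']) true true

-- ===== PORT B =====
def pvCITable : List (List Char × Bool) :=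
  [("ci".toList, true), ("case_insensitive".toList, true),
   ("no_ci".toList, false), ("case_sensitive".toList, false), ("exact".toList, false)]

def pvTrimTable : List (List Char × Bool) :=
  [("trim".toList, true), ("no_trim".toList, false), ("raw".toList, false)]

def parse_flag_blob_py_alt (blob : String) : Bool × Bool :=
  let tokens : List (List Char) :=
    if blob.toList = [] then [] else (PySem.Chars.splitOn blob.toList [',']).map pvNormTok
  let ci := (tokens.reverse.findSome? (fun t => List.lookup t pvCITable)).getD true
  let trim := (tokens.reverse.findSome? (fun t => List.lookup t pvTrimTable)).getD true
  (ci, trim)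

-- ===== PRECONDITION & SPEC =====
def Spec_parse_flag_blob_py (blob : String) (out : Bool × Bool) : Prop := out = parse_flag_blob_py_alt blob
instance (blob : String) (out : Bool × Bool) : Decidable (Spec_parse_flag_blob_py blob out) := by unfold Spec_parse_flag_blob_py; infer_instance

-- ===== CLAIM (what is proved, stated in full; the proofs are below) =====
def Claim_equal_parse_flag_blob_py : Prop := ∀ (blob : String), Dom_parse_flag_blob_py blob → Spec_parse_flag_blob_py blob (parse_flag_blob_py blob)

-- ===== LEMMAS AND PROOFS =====

theorem findSome?_concat {α β : Type} (l : List α) (x : α) (f : α → Option β) :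
    (l ++ [x]).findSome? f = ((l.findSome? f).or (f x)) := by
  induction l with
  | nil => simp [List.findSome?]
  | cons a l ih =>
    simp only [List.cons_append, List.findSome?]
    cases f a <;> simp [ih]

-- A's forward last-wins fold equals B's backward first-match with the current accumulators as defaults.
theorem loop_eq (ts : List (List Char)) (ci trim : Bool) :
    pvLoopA ts ci trim =
      (((ts.map pvNormTok).reverse.findSome? (fun t => List.lookup t pvCITable)).getD ci,
       ((ts.map pvNormTok).reverse.findSome? (fun t => List.lookup t pvTrimTable)).getD trim) := by
  induction ts generalizing ci trim with
  | nil => simp [pvLoopA]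
  | cons raw rest ih =>
    simp only [List.map_cons, List.reverse_cons, findSome?_concat, pvLoopA]
    split_ifs with h1 h2 h3 h4 h5
    · have hC : List.lookup (pvNormTok raw) pvCITable = none := by rw [h1]; decide
      have hT : List.lookup (pvNormTok raw) pvTrimTable = none := by rw [h1]; decide
      rw [hC, hT, ih]
      cases (rest.map pvNormTok).reverse.findSome? (fun t => List.lookup t pvCITable) <;>
        cases (rest.map pvNormTok).reverse.findSome? (fun t => List.lookup t pvTrimTable) <;>
          simp [Option.or]
    · have hC : List.lookup (pvNormTok raw) pvCITable = some true := by
        rcases h2 with h | h <;> rw [h] <;> decide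
      have hT : List.lookup (pvNormTok raw) pvTrimTable = none := by
        rcases h2 with h | h <;> rw [h] <;> decide
      rw [hC, hT, ih]
      cases (rest.map pvNormTok).reverse.findSome? (fun t => List.lookup t pvCITable) <;>
        cases (rest.map pvNormTok).reverse.findSome? (fun t => List.lookup t pvTrimTable) <;>
          simp [Option.or]
    · have hC : List.lookup (pvNormTok raw) pvCITable = some false := by
        rcases h3 with h | h | h <;> rw [h] <;> decide
      have hT : List.lookup (pvNormTok raw) pvTrimTable = none := by
        rcases h3 with h | h | h <;> rw [h] <;> decide
      rw [hC, hT, ih]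
      cases (rest.map pvNormTok).reverse.findSome? (fun t => List.lookup t pvCITable) <;>
        cases (rest.map pvNormTok).reverse.findSome? (fun t => List.lookup t pvTrimTable) <;>
          simp [Option.or]
    · have hC : List.lookup (pvNormTok raw) pvCITable = none := by rw [h4]; decide
      have hT : List.lookup (pvNormTok raw) pvTrimTable = some true := by rw [h4]; decide
      rw [hC, hT, ih]
      cases (rest.map pvNormTok).reverse.findSome? (fun t => List.lookup t pvCITable) <;>
        cases (rest.map pvNormTok).reverse.findSome? (fun t => List.lookup t pvTrimTable) <;>
          simp [Option.or]
    · have hC : List.lookup (pvNormTok raw) pvCITable = none := by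
        rcases h5 with h | h <;> rw [h] <;> decide
      have hT : List.lookup (pvNormTok raw) pvTrimTable = some false := by
        rcases h5 with h | h <;> rw [h] <;> decide
      rw [hC, hT, ih]
      cases (rest.map pvNormTok).reverse.findSome? (fun t => List.lookup t pvCITable) <;>
        cases (rest.map pvNormTok).reverse.findSome? (fun t => List.lookup t pvTrimTable) <;>
          simp [Option.or]
    · have e1 : (pvNormTok raw == ['c', 'i']) = false := beq_eq_false_iff_ne.mpr (fun h => h2 (Or.inl h))
      have e2 : (pvNormTok raw == ['c', 'a', 's', 'e', '_', 'i', 'n', 's', 'e', 'n', 's', 'i', 't', 'i', 'v', 'e']) = false := beq_eq_false_iff_ne.mpr (fun h => h2 (Or.inr h))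
      have e3 : (pvNormTok raw == ['n', 'o', '_', 'c', 'i']) = false := beq_eq_false_iff_ne.mpr (fun h => h3 (Or.inl h))
      have e4 : (pvNormTok raw == ['c', 'a', 's', 'e', '_', 's', 'e', 'n', 's', 'i', 't', 'i', 'v', 'e']) = false := beq_eq_false_iff_ne.mpr (fun h => h3 (Or.inr (Or.inl h)))
      have e5 : (pvNormTok raw == ['e', 'x', 'a', 'c', 't']) = false := beq_eq_false_iff_ne.mpr (fun h => h3 (Or.inr (Or.inr h)))
      have e6 : (pvNormTok raw == ['t', 'r', 'i', 'm']) = false := beq_eq_false_iff_ne.mpr h4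
      have e7 : (pvNormTok raw == ['n', 'o', '_', 't', 'r', 'i', 'm']) = false := beq_eq_false_iff_ne.mpr (fun h => h5 (Or.inl h))
      have e8 : (pvNormTok raw == ['r', 'a', 'w']) = false := beq_eq_false_iff_ne.mpr (fun h => h5 (Or.inr h))
      have hC : List.lookup (pvNormTok raw) pvCITable = none := by
        simp [pvCITable, List.lookup, e1, e2, e3, e4, e5]
      have hT : List.lookup (pvNormTok raw) pvTrimTable = none := by
        simp [pvTrimTable, List.lookup, e6, e7, e8]
      rw [hC, hT, ih]
      cases (rest.map pvNormTok).reverse.findSome? (fun t => List.lookup t pvCITable) <;>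
        cases (rest.map pvNormTok).reverse.findSome? (fun t => List.lookup t pvTrimTable) <;>
          simp [Option.or]

theorem parse_flag_blob_py_spec : Claim_equal_parse_flag_blob_py := by
  intro blob _
  unfold Spec_parse_flag_blob_py parse_flag_blob_py parse_flag_blob_py_alt
  by_cases h : blob.toList = []
  · simp [h]
  · simp only [h, if_false]
    exact loop_eq _ true true
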